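-- pv_equiv track=rewrite | github.com/StasanSas/LZMA | coder.py | get_dict_with_numeric_line_not_normal
-- ===== SOURCE A (Python) =====
-- def get_dict_with_numeric_line_not_normal(keys_and_values_list):
--     last_value = None
--     new_dict = {}
--     for keys_and_value in keys_and_values_list:
--         if last_value is None:
--             new_dict[keys_and_value[0]] = (0, keys_and_value[1])
--             last_value = keys_and_value[1]
--         else:
--             new_dict[keys_and_value[0]] = (last_value, keys_and_value[1] + last_value)
--             last_value = keys_and_value[1] + last_value
--     return new_dict
-- ===== SOURCE B (Python) =====
-- def get_dict_with_numeric_line_not_normal(keys_and_values_list):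
--     # prefix-sum table first, then assemble (start, end) ranges
--     ends = []
--     total = 0
--     for _, v in keys_and_values_list:
--         total += v
--         ends.append(total)
--     starts = [0] + ends[:-1]
--     return {kv[0]: (s, e) for kv, s, e in zip(keys_and_values_list, starts, ends)}
-- ===== Notes on version B (the rewrite author's own statement) =====
-- stated objective: idiomatic
-- what changed: Replaced the inline running-total with a None first-iteration guard by a two-phase decomposition: build the prefix-sum table once, then assemble each key's (previous-cumulative, cumulative) range by zipping keys with the shifted and unshifted sums.
import Mathlib
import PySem

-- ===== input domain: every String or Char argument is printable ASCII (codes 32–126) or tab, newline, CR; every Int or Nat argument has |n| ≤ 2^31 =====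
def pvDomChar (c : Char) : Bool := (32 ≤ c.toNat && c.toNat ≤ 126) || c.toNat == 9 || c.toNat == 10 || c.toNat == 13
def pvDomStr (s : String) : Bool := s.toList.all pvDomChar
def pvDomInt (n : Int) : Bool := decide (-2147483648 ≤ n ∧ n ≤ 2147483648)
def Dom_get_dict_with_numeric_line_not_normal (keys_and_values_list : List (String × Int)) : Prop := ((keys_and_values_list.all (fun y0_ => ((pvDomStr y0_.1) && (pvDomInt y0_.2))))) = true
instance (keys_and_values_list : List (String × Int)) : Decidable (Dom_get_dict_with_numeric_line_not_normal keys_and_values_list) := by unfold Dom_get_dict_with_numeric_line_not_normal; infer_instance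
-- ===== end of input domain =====

-- B replaces A's inline running total (with its None first-iteration guard) by a
-- build-the-prefix-sum-table-then-assemble-ranges decomposition (idiomatic, same cost).

-- ===== PORT A =====
def get_dict_with_numeric_line_not_normal (keys_and_values_list : List (String × Int)) : List (String × Int × Int) :=
  (keys_and_values_list.foldl
    (fun (st : Option Int × PySem.Dict String (Int × Int)) kv =>
      match st.1 with
      | none => (some kv.2, st.2.insert kv.1 (0, kv.2))
      | some lv => (some (kv.2 + lv), st.2.insert kv.1 (lv, kv.2 + lv)))
    (none, PySem.Dict.empty)).2.items

-- ===== PORT B =====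
-- running prefix sums of the values (the 'ends' loop of Source B)
def pvEnds : Int → List (String × Int) → List Int
  | _, [] => []
  | total, kv :: rest => (total + kv.2) :: pvEnds (total + kv.2) rest

def get_dict_with_numeric_line_not_normal_alt (keys_and_values_list : List (String × Int)) : List (String × Int × Int) :=
  let ends := pvEnds 0 keys_and_values_list
  let starts := 0 :: ends.dropLast
  ((List.zip keys_and_values_list (List.zip starts ends)).foldl
    (fun (d : PySem.Dict String (Int × Int)) p => d.insert p.1.1 p.2)
    PySem.Dict.empty).items

-- ===== PRECONDITION & SPEC =====
def Spec_get_dict_with_numeric_line_not_normal (keys_and_values_list : List (String × Int)) (out : List (String × Int × Int)) : Prop := out = get_dict_with_numeric_line_not_normal_alt keys_and_values_list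
instance (keys_and_values_list : List (String × Int)) (out : List (String × Int × Int)) : Decidable (Spec_get_dict_with_numeric_line_not_normal keys_and_values_list out) := by unfold Spec_get_dict_with_numeric_line_not_normal; infer_instance

-- ===== CLAIM (what is proved, stated in full; the proofs are below) =====
def Claim_equal_get_dict_with_numeric_line_not_normal : Prop := ∀ (keys_and_values_list : List (String × Int)), Dom_get_dict_with_numeric_line_not_normal keys_and_values_list → Spec_get_dict_with_numeric_line_not_normal keys_and_values_list (get_dict_with_numeric_line_not_normal keys_and_values_list)

-- ===== LEMMAS AND PROOFS =====

-- zip cuts the last element anyway, so the dropLast in 'starts' is invisible to it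
lemma zip_dropLast (u : List Int) (a : Int) :
    List.zip (a :: u).dropLast u = List.zip (a :: u) u := by
  induction u generalizing a with
  | nil => rfl
  | cons y u ih =>
    simp only [List.dropLast_cons₂, List.zip_cons_cons]
    rw [ih]

-- A's loop from state (some s, d) builds exactly B's ranges with prefix sums started at s
lemma loop_eq (l : List (String × Int)) (s : Int) (d : PySem.Dict String (Int × Int)) :
    (l.foldl
      (fun (st : Option Int × PySem.Dict String (Int × Int)) kv =>
        match st.1 with
        | none => (some kv.2, st.2.insert kv.1 (0, kv.2))
        | some lv => (some (kv.2 + lv), st.2.insert kv.1 (lv, kv.2 + lv)))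
      (some s, d)).2 =
    (List.zip l (List.zip (s :: pvEnds s l) (pvEnds s l))).foldl
      (fun (d : PySem.Dict String (Int × Int)) p => d.insert p.1.1 p.2) d := by
  induction l generalizing s d with
  | nil => rfl
  | cons kv rest ih =>
    simp only [List.foldl_cons, pvEnds, List.zip_cons_cons]
    rw [show kv.2 + s = s + kv.2 by ring, ih]

theorem pv_main (l : List (String × Int)) :
    get_dict_with_numeric_line_not_normal l = get_dict_with_numeric_line_not_normal_alt l := by
  cases l with
  | nil => rfl
  | cons kv rest =>
    unfold get_dict_with_numeric_line_not_normal get_dict_with_numeric_line_not_normal_alt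
    simp only [List.foldl_cons, pvEnds, zero_add]
    rw [List.zip_cons_cons, zip_dropLast, loop_eq, List.zip_cons_cons, List.foldl_cons]

-- ===== VERDICT (by name: the statement is the Claim_ definition above) =====
theorem get_dict_with_numeric_line_not_normal_spec : Claim_equal_get_dict_with_numeric_line_not_normal := by
  intro l _
  exact pv_main l
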